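-- pv_equiv track=rewrite | github.com/julianlegouic/TipQuant | src/core/tip.py | get_anomaly_series
-- ===== SOURCE A (Python) =====
-- def get_anomaly_series(is_anomaly):
--     """ computes a list of list. sublist sequences of anomalies. for example if there are
--      anomalies at index (wrt tubes) 1, 2, 3 and 7, it would return [[1, 2, 3], [7]]"""
--     anomaly_series = list()
--     is_anomaly_serie = False
--     for i in range(len(is_anomaly)):
--         if is_anomaly[i] == 1 and is_anomaly_serie:
--             anomaly_series[-1].append(i)
--         elif is_anomaly[i] == 1 and not is_anomaly_serie:
--             anomaly_series.append([i])
--             is_anomaly_serie = True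
--         else:
--             is_anomaly_serie = False
--     return anomaly_series
-- ===== SOURCE B (Python) =====
-- def get_anomaly_series(is_anomaly):
--     """Collect anomaly indices in one pass, then recursively split them
--     into maximal runs of consecutive integers."""
--     idxs = [i for i, v in enumerate(is_anomaly) if v == 1]
--
--     def split(xs):
--         if not xs:
--             return []
--         group = [xs[0]]
--         k = 1
--         while k < len(xs) and xs[k] == xs[k - 1] + 1:
--             group.append(xs[k])
--             k += 1
--         return [group] + split(xs[k:])
--
--     return split(idxs)
-- ===== Notes on version B (the rewrite author's own statement) =====
-- stated objective: alternative
-- what changed: A interleaves detection and grouping in one stateful pass with a boolean run-flag and in-place append to the last group; B first collects all anomaly indices with a comprehension and then recursively splits that index list into maximal consecutive runs, with no flag and no mutation of existing groups.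
import Mathlib
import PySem

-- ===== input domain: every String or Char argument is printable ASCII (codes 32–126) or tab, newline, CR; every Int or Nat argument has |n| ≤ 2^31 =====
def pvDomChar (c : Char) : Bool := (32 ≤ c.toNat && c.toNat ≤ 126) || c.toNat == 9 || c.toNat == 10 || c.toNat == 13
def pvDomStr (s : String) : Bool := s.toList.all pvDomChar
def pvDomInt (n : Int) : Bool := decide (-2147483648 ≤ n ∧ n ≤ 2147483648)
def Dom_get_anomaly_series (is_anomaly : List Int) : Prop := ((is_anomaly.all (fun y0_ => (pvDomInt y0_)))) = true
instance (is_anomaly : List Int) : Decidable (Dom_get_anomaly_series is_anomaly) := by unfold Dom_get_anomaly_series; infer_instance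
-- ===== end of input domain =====

-- B replaces A's one stateful pass (boolean run-flag + append to the last group) by
-- collect-all-anomaly-indices then recursive splitting into maximal consecutive runs
-- (objective: alternative decomposition, same O(n) cost).

-- ===== PORT A =====
-- anomaly_series[-1].append(i) : append i to the last sublist (flag invariant keeps it nonempty)
def pvAppendLast : List (List Int) → Int → List (List Int)
  | [], _ => []
  | [g], i => [g ++ [i]]
  | g :: rest, i => g :: pvAppendLast rest i

-- the `for i in range(len(is_anomaly))` loop, reading is_anomaly[i] in order
def pvALoop : List Int → Int → List (List Int) → Bool → List (List Int)
  | [], _, acc, _ => acc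
  | v :: rest, i, acc, flag =>
    if v = 1 ∧ flag = true then pvALoop rest (i + 1) (pvAppendLast acc i) true
    else if v = 1 ∧ flag = false then pvALoop rest (i + 1) (acc ++ [[i]]) true
    else pvALoop rest (i + 1) acc false

def get_anomaly_series (is_anomaly : List Int) : List (List Int) :=
  pvALoop is_anomaly 0 [] false

-- ===== PORT B =====
-- [i for i, v in enumerate(is_anomaly) if v == 1]
def pvIdxs : List Int → Int → List Int
  | [], _ => []
  | v :: rest, i => if v = 1 then i :: pvIdxs rest (i + 1) else pvIdxs rest (i + 1)

-- the `while` loop of Source B's split: the maximal consecutive run continuing prev, and the rest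
def pvTakeRun : Int → List Int → List Int × List Int
  | _, [] => ([], [])
  | prev, x :: rest =>
    if x = prev + 1 then ((x :: (pvTakeRun x rest).1), (pvTakeRun x rest).2)
    else ([], x :: rest)

theorem pvTakeRun_len : ∀ (l : List Int) (p : Int), (pvTakeRun p l).2.length ≤ l.length := by
  intro l
  induction l with
  | nil => intro p; simp [pvTakeRun]
  | cons x rest ih =>
    intro p
    by_cases h : x = p + 1 <;> simp [pvTakeRun, h]
    exact Nat.le_succ_of_le (ih _)

-- Source B's recursive split
def pvSplit : List Int → List (List Int)
  | [] => []
  | x :: rest => (x :: (pvTakeRun x rest).1) :: pvSplit (pvTakeRun x rest).2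
  termination_by l => l.length
  decreasing_by
    simpa using Nat.lt_succ_of_le (pvTakeRun_len rest x)

def get_anomaly_series_alt (is_anomaly : List Int) : List (List Int) :=
  pvSplit (pvIdxs is_anomaly 0)

-- ===== PRECONDITION & SPEC =====
def Spec_get_anomaly_series (is_anomaly : List Int) (out : List (List Int)) : Prop := out = get_anomaly_series_alt is_anomaly
instance (is_anomaly : List Int) (out : List (List Int)) : Decidable (Spec_get_anomaly_series is_anomaly out) := by unfold Spec_get_anomaly_series; infer_instance

-- ===== CLAIM (what is proved, stated in full; the proofs are below) =====
def Claim_equal_get_anomaly_series : Prop := ∀ (is_anomaly : List Int), Dom_get_anomaly_series is_anomaly → Spec_get_anomaly_series is_anomaly (get_anomaly_series is_anomaly)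

-- ===== LEMMAS AND PROOFS =====

-- canonical middle form: structural pass carrying the group in progress
def pvS : List Int → Int → Option (List Int) → List (List Int)
  | [], _, none => []
  | [], _, some g => [g]
  | v :: rest, i, none => if v = 1 then pvS rest (i + 1) (some [i]) else pvS rest (i + 1) none
  | v :: rest, i, some g => if v = 1 then pvS rest (i + 1) (some (g ++ [i])) else g :: pvS rest (i + 1) none

theorem pvAppendLast_snoc (acc : List (List Int)) (g : List Int) (i : Int) :
    pvAppendLast (acc ++ [g]) i = acc ++ [g ++ [i]] := by
  induction acc with
  | nil => simp [pvAppendLast]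
  | cons a t ih =>
    have h : pvAppendLast ((a :: t) ++ [g]) i = a :: pvAppendLast (t ++ [g]) i := by
      cases t <;> simp [pvAppendLast]
    rw [h, ih]; simp

theorem pvALoop_S : ∀ (xs : List Int) (i : Int),
    (∀ acc, pvALoop xs i acc false = acc ++ pvS xs i none) ∧
    (∀ acc g, pvALoop xs i (acc ++ [g]) true = acc ++ pvS xs i (some g)) := by
  intro xs
  induction xs with
  | nil =>
    intro i
    exact ⟨fun acc => by simp [pvALoop, pvS], fun acc g => by simp [pvALoop, pvS]⟩
  | cons v rest ih =>
    intro i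
    constructor
    · intro acc
      by_cases hv : v = 1
      · simpa [pvALoop, hv, pvS] using (ih (i + 1)).2 acc [i]
      · simpa [pvALoop, hv, pvS] using (ih (i + 1)).1 acc
    · intro acc g
      by_cases hv : v = 1
      · simpa [pvALoop, hv, pvS, pvAppendLast_snoc] using (ih (i + 1)).2 acc (g ++ [i])
      · have := (ih (i + 1)).1 (acc ++ [g])
        simp [pvALoop, hv, pvS]
        simpa using this

theorem pvIdxs_lb : ∀ (xs : List Int) (i x : Int), x ∈ pvIdxs xs i → i ≤ x := by
  intro xs
  induction xs with
  | nil => intro i x h; simp [pvIdxs] at h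
  | cons v rest ih =>
    intro i x h
    by_cases hv : v = 1 <;> simp [pvIdxs, hv] at h
    · rcases h with h | h
      · omega
      · have := ih (i + 1) x h; omega
    · have := ih (i + 1) x h; omega

theorem pvSplit_S : ∀ (xs : List Int) (i : Int),
    (pvSplit (pvIdxs xs i) = pvS xs i none) ∧
    (∀ g, pvS xs i (some g) =
      (g ++ (pvTakeRun (i - 1) (pvIdxs xs i)).1) :: pvSplit (pvTakeRun (i - 1) (pvIdxs xs i)).2) := by
  intro xs
  induction xs with
  | nil =>
    intro i
    exact ⟨by simp [pvIdxs, pvSplit, pvS], fun g => by simp [pvIdxs, pvS, pvTakeRun, pvSplit]⟩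
  | cons v rest ih =>
    intro i
    constructor
    · by_cases hv : v = 1
      · have h2 := (ih (i + 1)).2 [i]
        have hi : i + 1 - 1 = i := by omega
        rw [hi] at h2
        simp [pvIdxs, hv, pvSplit, pvS, h2]
      · simpa [pvIdxs, hv, pvS] using (ih (i + 1)).1
    · intro g
      by_cases hv : v = 1
      · have h2 := (ih (i + 1)).2 (g ++ [i])
        have hi : i + 1 - 1 = i := by omega
        rw [hi] at h2
        simp [pvIdxs, hv, pvS, pvTakeRun, h2]
      · -- v ≠ 1: the run stops; pvTakeRun (i-1) (pvIdxs rest (i+1)) = ([], …)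
        have hstop : pvTakeRun (i - 1) (pvIdxs rest (i + 1)) = ([], pvIdxs rest (i + 1)) := by
          cases hL : pvIdxs rest (i + 1) with
          | nil => simp [pvTakeRun]
          | cons y t =>
            have hy : (i : Int) + 1 ≤ y := by
              apply pvIdxs_lb rest (i + 1) y
              simp [hL]
            have : ¬ (y = i) := by omega
            simp [pvTakeRun, this]
        simp [pvIdxs, hv, pvS, hstop, (ih (i + 1)).1]

-- ===== VERDICT (by name: the statement is the Claim_ definition above) =====
theorem get_anomaly_series_spec : Claim_equal_get_anomaly_series := by
  intro xs _
  unfold Spec_get_anomaly_series get_anomaly_series get_anomaly_series_alt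
  rw [(pvSplit_S xs 0).1]
  simpa using (pvALoop_S xs 0).1 []
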